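-- pv_equiv track=rewrite | github.com/orbisvicis/pyteach | 11.morse/stats.py | list_splits
-- ===== SOURCE A (Python) =====
-- import itertools
--
-- def list_splits(l, k):
--     if k > max(1, len(l)):
--         raise ValueError
--     if k < 1:
--         raise ValueError
--     ix = range(1, len(l))
--     for ss in itertools.combinations(ix, k-1):
--         ss = [None] + list(ss) + [None]
--         cs = []
--         for r in zip(ss, ss[1:]):
--             s = slice(*r)
--             cs.append(l[s])
--         yield cs
-- ===== SOURCE B (Python) =====
-- def list_splits(l, k):
--     if k > max(1, len(l)):
--         raise ValueError
--     if k < 1: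
--         raise ValueError
--     yield from _splits(list(l), k)
--
-- def _splits(l, k):
--     if k == 1:
--         yield [l]
--         return
--     for i in range(1, len(l) - (k - 1) + 1):
--         head = l[:i]
--         for rest in _splits(l[i:], k - 1):
--             yield [head] + rest
-- ===== Notes on version B (the rewrite author's own statement) =====
-- stated objective: simpler
-- what changed: A materializes every (k-1)-subset of cut positions via itertools.combinations and slices the list along each; B recurses directly on the number of parts, yielding each first-part length 1..len-(k-1) and splitting the remainder, producing the same splits in the same lexicographic order.
import Mathlib
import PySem

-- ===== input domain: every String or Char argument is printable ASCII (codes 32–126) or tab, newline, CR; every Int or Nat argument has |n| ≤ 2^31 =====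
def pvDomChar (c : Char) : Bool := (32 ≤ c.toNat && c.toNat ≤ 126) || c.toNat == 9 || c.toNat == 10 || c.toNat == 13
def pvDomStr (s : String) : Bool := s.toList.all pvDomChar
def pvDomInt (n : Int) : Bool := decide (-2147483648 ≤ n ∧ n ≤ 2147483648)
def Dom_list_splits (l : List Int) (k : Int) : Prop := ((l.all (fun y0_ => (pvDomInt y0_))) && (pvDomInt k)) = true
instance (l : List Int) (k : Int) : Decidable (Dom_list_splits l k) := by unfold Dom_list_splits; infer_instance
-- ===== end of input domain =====

-- B replaces A's itertools.combinations-over-cut-positions with a direct recursion on the number of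
-- parts (first-part length ascending), same values and order; objective: simpler. Both Pythons are
-- generators; equivalence is about the list of yielded values.

-- ===== PORT A =====
-- Hand port of itertools.combinations(xs, n): all n-element sublists in lexicographic order of
-- positions — exact for the list of tuples Python yields.
def pvCombs : List Int → Nat → List (List Int)
  | _, 0 => [[]]
  | [], _ + 1 => []
  | x :: xs, n + 1 => (pvCombs xs n).map (fun c => x :: c) ++ pvCombs xs (n + 1)

def list_splits (l : List Int) (k : Int) : List (List (List Int)) :=
  if k > max 1 (l.length : Int) then []        -- Python: raise ValueError (excluded by Pre_)
  else if k < 1 then []                        -- Python: raise ValueError (excluded by Pre_)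
  else
    let ix := PySem.List.pyRange 1 (l.length : Int)
    (pvCombs ix (k - 1).toNat).map (fun ss =>
      let ss' : List (Option Int) := [none] ++ ss.map some ++ [none]
      (ss'.zip ss'.tail).foldl (fun cs r => cs ++ [PySem.List.slice l r.1 r.2]) [])

-- ===== PORT B =====
-- port of Source B's _splits; the Int count k is passed as k.toNat (k ≥ 1 under the guards; 0 unreachable)
def pvSplits : List Int → Nat → List (List (List Int))
  | _, 0 => []
  | l, 1 => [[l]]
  | l, n + 2 =>
    (PySem.List.pyRange 1 ((l.length : Int) - (((n : Int) + 2) - 1) + 1)).flatMap (fun i =>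
      (pvSplits (PySem.List.slice l (some i) none) (n + 1)).map
        (fun rest => PySem.List.slice l none (some i) :: rest))

def list_splits_alt (l : List Int) (k : Int) : List (List (List Int)) :=
  if k > max 1 (l.length : Int) then []        -- Python: raise ValueError (excluded by Pre_)
  else if k < 1 then []                        -- Python: raise ValueError (excluded by Pre_)
  else pvSplits l k.toNat

-- ===== PRECONDITION & SPEC =====
-- Pre_ is exactly A's two ValueError guards: the generator raises at first next() unless 1 ≤ k ≤ max(1, len(l)).
def Pre_list_splits (l : List Int) (k : Int) : Prop := 1 ≤ k ∧ k ≤ max 1 (l.length : Int)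
instance (l : List Int) (k : Int) : Decidable (Pre_list_splits l k) := by unfold Pre_list_splits; infer_instance
def pvWitness_list_splits : List Int × Int := ([1, 2, 3], 2)

def Spec_list_splits (l : List Int) (k : Int) (out : List (List (List Int))) : Prop := out = list_splits_alt l k
instance (l : List Int) (k : Int) (out : List (List (List Int))) : Decidable (Spec_list_splits l k out) := by unfold Spec_list_splits; infer_instance

-- ===== CLAIM (what is proved, stated in full; the proofs are below) =====
def Claim_equal_list_splits : Prop := ∀ (l : List Int) (k : Int), Dom_list_splits l k → Pre_list_splits l k → Spec_list_splits l k (list_splits l k)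

-- ===== LEMMAS AND PROOFS =====

-- recursive reformulation of A's zip/slice inner loop
def pvCuts (l : List Int) (prev : Option Int) : List Int → List (List Int)
  | [] => [PySem.List.slice l prev none]
  | s :: rest => PySem.List.slice l prev (some s) :: pvCuts l (some s) rest

theorem pvCuts_eq_zip (l : List Int) (prev : Option Int) (ss : List Int) :
    ((prev :: (ss.map some ++ [none])).zip (ss.map some ++ [none])).map
      (fun r => PySem.List.slice l r.1 r.2) = pvCuts l prev ss := by
  induction ss generalizing prev with
  | nil => simp [pvCuts]
  | cons s rest ih => simpa [pvCuts, List.zip] using ih (some s)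

theorem pvCombs_map (f : Int → Int) (xs : List Int) (n : Nat) :
    pvCombs (xs.map f) n = (pvCombs xs n).map (List.map f) := by
  induction xs generalizing n with
  | nil => cases n <;> simp [pvCombs]
  | cons x xs ih =>
    cases n with
    | zero => simp [pvCombs]
    | succ n => simp [pvCombs, ih, Function.comp_def]

theorem pvCombs_nil_of_short (xs : List Int) (n : Nat) (h : xs.length < n) : pvCombs xs n = [] := by
  induction xs generalizing n with
  | nil =>
    cases n with
    | zero => omega
    | succ n => rfl
  | cons x xs ih =>
    cases n with
    | zero => omega
    | succ n =>
      simp only [List.length_cons] at h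
      simp [pvCombs, ih n (by omega), ih (n + 1) (by omega)]

-- lexicographic combinations of a range, grouped by first element
theorem pvCombs_range_decomp (n : Nat) (s m : Int) :
    pvCombs (PySem.List.pyRange s m) (n + 1) =
      (PySem.List.pyRange s m).flatMap (fun i =>
        (pvCombs (PySem.List.pyRange (i + 1) m) n).map (fun c => i :: c)) := by
  by_cases h : s < m
  · have hlen : ((m - (s+1)).toNat) < ((m - s).toNat) := by omega
    rw [PySem.List.pyRange_one_cons h]
    simp only [pvCombs, List.flatMap_cons]
    congr 1
    exact pvCombs_range_decomp n (s + 1) m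
  · have : PySem.List.pyRange s m = [] := by
      rw [PySem.List.pyRange_one]
      simp [show (m - s).toNat = 0 by omega]
    simp [this, pvCombs]
termination_by (m - s).toNat
decreasing_by omega

theorem pyRange_shift (i m : Int) :
    PySem.List.pyRange (i + 1) m = (PySem.List.pyRange 1 (m - i)).map (fun x => x + i) := by
  rw [PySem.List.pyRange_one, PySem.List.pyRange_one]
  rw [show (m - i - 1).toNat = (m - (i + 1)).toNat by omega, List.map_map]
  exact List.map_congr_left (fun k _ => by simp; ring)

theorem pvCuts_shift (l : List Int) (i : Int) (hi : 0 ≤ i) (rest : List Int)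
    (hrest : ∀ x ∈ rest, 0 ≤ x) (a : Int) (ha : 0 ≤ a) :
    pvCuts l (some (a + i)) (rest.map (fun x => x + i)) =
      pvCuts (l.drop i.toNat) (some a) rest := by
  induction rest generalizing a with
  | nil =>
    simp only [List.map_nil, pvCuts]
    rw [PySem.List.slice_from _ (by omega : (0:Int) ≤ a + i),
      PySem.List.slice_from _ ha, List.drop_drop]
    congr 2
    omega
  | cons s rest ih =>
    have hs : 0 ≤ s := hrest s (by simp)
    have hhead : PySem.List.slice l (some (a + i)) (some (s + i)) =
        PySem.List.slice (l.drop i.toNat) (some a) (some s) := by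
      rw [PySem.List.slice_toNat _ (by omega : (0:Int) ≤ a + i) (by omega : (0:Int) ≤ s + i),
        PySem.List.slice_toNat _ ha hs, List.drop_drop]
      congr 1
      · omega
      · congr 1
        omega
    simp only [List.map_cons, pvCuts]
    rw [hhead, ih (fun x hx => hrest x (by simp [hx])) s hs]

theorem pvCuts_some_zero (xs : List Int) (rest : List Int) :
    pvCuts xs (some 0) rest = pvCuts xs none rest := by
  cases rest <;> simp [pvCuts, PySem.List.slice_zero_start]

theorem pvCombs_mem_of_mem (xs : List Int) (n : Nat) (c : List Int)
    (hc : c ∈ pvCombs xs n) (x : Int) (hx : x ∈ c) : x ∈ xs := by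
  induction xs generalizing n c with
  | nil =>
    cases n with
    | zero => simp [pvCombs] at hc; simp [hc] at hx
    | succ n => simp [pvCombs] at hc
  | cons y ys ih =>
    cases n with
    | zero => simp [pvCombs] at hc; simp [hc] at hx
    | succ n =>
      simp only [pvCombs, List.mem_append, List.mem_map] at hc
      rcases hc with ⟨c', hc', rfl⟩ | hc
      · rcases List.mem_cons.mp hx with rfl | hx'
        · simp
        · exact List.mem_cons_of_mem _ (ih n c' hc' hx')
      · exact List.mem_cons_of_mem _ (ih (n+1) c hc hx)

theorem pvCuts_shift0 (l : List Int) (i : Int) (hi : 0 ≤ i) (rest : List Int)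
    (hrest : ∀ x ∈ rest, 0 ≤ x) :
    pvCuts l (some i) (rest.map (fun x => x + i)) = pvCuts (l.drop i.toNat) none rest := by
  have h := pvCuts_shift l i hi rest hrest 0 le_rfl
  rw [zero_add] at h
  rw [h, pvCuts_some_zero]

-- the heart: A's combinations-of-cut-positions mapped through the slicing loop is B's recursion
theorem pvMain (n : Nat) (l : List Int) (h : (n : Int) + 1 ≤ max 1 (l.length : Int)) :
    (pvCombs (PySem.List.pyRange 1 (l.length : Int)) n).map (pvCuts l none) =
      pvSplits l (n + 1) := by
  induction n generalizing l with
  | zero => simp [pvCombs, pvCuts, pvSplits, PySem.List.slice_none_none]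
  | succ n ih =>
    have hm : (n : Int) + 2 ≤ (l.length : Int) := by
      simp only [le_max_iff] at h
      omega
    set m : Int := (l.length : Int) with hmdef
    rw [pvCombs_range_decomp]
    rw [PySem.List.pyRange_one_append 1 (m - n) m (by omega) (by omega), List.flatMap_append]
    have hdead : (PySem.List.pyRange (m - n) m).flatMap (fun i =>
        (pvCombs (PySem.List.pyRange (i + 1) m) n).map (fun c => i :: c)) = [] := by
      rw [List.flatMap_eq_nil_iff]
      intro i hi
      rw [PySem.List.mem_pyRange_one] at hi
      rw [pvCombs_nil_of_short _ n (by rw [PySem.List.length_pyRange_one]; omega)]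
      rfl
    rw [hdead, List.append_nil, List.map_flatMap]
    simp only [pvSplits]
    rw [show (l.length : Int) - (((n : Int) + 2) - 1) + 1 = m - n by omega]
    refine List.flatMap_congr ?_
    intro i hi
    rw [PySem.List.mem_pyRange_one] at hi
    have hi0 : 0 ≤ i := by omega
    have hlen : ((l.drop i.toNat).length : Int) = m - i := by
      rw [List.length_drop]
      omega
    rw [pyRange_shift, pvCombs_map, List.map_map, List.map_map]
    rw [PySem.List.slice_from _ hi0]
    rw [← ih (l.drop i.toNat) (by rw [hlen]; refine le_max_iff.mpr (Or.inr ?_); omega)]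
    rw [hlen, List.map_map]
    refine List.map_congr_left ?_
    intro c hc
    have hc0 : ∀ x ∈ c, 0 ≤ x := fun x hx => by
      have hmem : x ∈ PySem.List.pyRange 1 (m - i) := pvCombs_mem_of_mem _ _ _ hc x hx
      rw [PySem.List.mem_pyRange_one] at hmem
      omega
    show pvCuts l none (i :: c.map (fun x => x + i)) = _
    simp only [pvCuts]
    rw [pvCuts_shift0 l i hi0 c hc0]
    rfl

-- ===== VERDICT (by name: the statement is the Claim_ definition above) =====
theorem list_splits_spec : Claim_equal_list_splits := by
  intro l k _ hpre
  obtain ⟨hk1, hk2⟩ := hpre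
  unfold Spec_list_splits list_splits list_splits_alt
  rw [if_neg (by omega), if_neg (by omega), if_neg (by omega), if_neg (by omega)]
  have hk : k.toNat = (k - 1).toNat + 1 := by omega
  rw [hk]
  rw [← pvMain (k - 1).toNat l (by
    simp only [le_max_iff] at hk2 ⊢
    omega)]
  apply List.map_congr_left
  intro ss _
  simp only []
  rw [PySem.List.foldl_append_singleton_eq_map, List.nil_append]
  have := pvCuts_eq_zip l none ss
  simpa using this
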